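-- pv_equiv track=rewrite | github.com/iosnewbie2016/cs7637-project1-python | Agent.py | compare_differences
-- ===== SOURCE A (Python) =====
-- def compare_differences(set1, set2, object_correspondences):
--     similarities = 0
--
--     for object1_name, object1_differences in set1.items():
--         if object1_name in object_correspondences:
--             object2_name = object_correspondences[object1_name]
--             for object1_difference in object1_differences:
--                 if object2_name in set2:
--                     for object2_difference in set2[object2_name]:
--                         if object1_difference == object2_difference:
--                             similarities += 1
--
--     return similarities
-- ===== SOURCE B (Python) =====
-- def compare_differences(set1, set2, object_correspondences):
--     total = 0
--     for name1, diffs1 in set1.items():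
--         name2 = object_correspondences.get(name1)
--         if name2 is None or name2 not in set2:
--             continue
--         c1 = {}
--         for d in diffs1:
--             c1[d] = c1.get(d, 0) + 1
--         c2 = {}
--         for d in set2[name2]:
--             c2[d] = c2.get(d, 0) + 1
--         total += sum(n * c2.get(v, 0) for v, n in c1.items())
--     return total
-- ===== Notes on version B (the rewrite author's own statement) =====
-- stated objective: alternative
-- what changed: Replaces A's nested all-pairs comparison of the two difference lists (for every pair of corresponding objects) by building a counting dict for each list once and summing count1[v]*count2[v] over the values of the first counter (O(N*(d1+d2)) comparisons instead of O(N*d1*d2)).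
import Mathlib
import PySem

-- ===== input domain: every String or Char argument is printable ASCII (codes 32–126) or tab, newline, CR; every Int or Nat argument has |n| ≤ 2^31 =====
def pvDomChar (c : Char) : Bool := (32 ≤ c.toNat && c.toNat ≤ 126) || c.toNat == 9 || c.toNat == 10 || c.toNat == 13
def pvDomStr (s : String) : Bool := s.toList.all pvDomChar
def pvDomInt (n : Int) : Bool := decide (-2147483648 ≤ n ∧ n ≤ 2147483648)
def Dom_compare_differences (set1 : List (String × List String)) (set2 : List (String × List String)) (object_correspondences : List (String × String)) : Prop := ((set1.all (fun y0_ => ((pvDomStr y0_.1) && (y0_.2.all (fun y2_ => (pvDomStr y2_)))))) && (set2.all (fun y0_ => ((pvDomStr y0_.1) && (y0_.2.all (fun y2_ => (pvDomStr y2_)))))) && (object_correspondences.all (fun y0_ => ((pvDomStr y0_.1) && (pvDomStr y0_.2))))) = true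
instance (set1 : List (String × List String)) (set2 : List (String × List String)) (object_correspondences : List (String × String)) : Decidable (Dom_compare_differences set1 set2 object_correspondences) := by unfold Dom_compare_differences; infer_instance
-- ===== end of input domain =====

-- B replaces A's nested per-pair difference scan (count1 × count2 comparisons per object pair)
-- by two counting dicts and one product-sum over shared values (a different, counter-based algorithm).

-- ===== PORT A =====
def compare_differences (set1 : List (String × List String)) (set2 : List (String × List String)) (object_correspondences : List (String × String)) : Int :=
  set1.foldl (fun similarities p =>
    match (PySem.Dict.mk object_correspondences).get? p.1 with
    | none => similarities
    | some object2_name =>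
      p.2.foldl (fun acc object1_difference =>
        match (PySem.Dict.mk set2).get? object2_name with
        | none => acc
        | some ds =>
          ds.foldl (fun a object2_difference =>
            if object1_difference == object2_difference then a + 1 else a) acc) similarities) 0

-- ===== PORT B =====
def compare_differences_alt (set1 : List (String × List String)) (set2 : List (String × List String)) (object_correspondences : List (String × String)) : Int :=
  set1.foldl (fun total p =>
    match (PySem.Dict.mk object_correspondences).get? p.1 with
    | none => total
    | some name2 =>
      match (PySem.Dict.mk set2).get? name2 with
      | none => total
      | some ds2 =>
        let c1 := p.2.foldl (fun d x => d.insert x (d.getD x 0 + 1)) (PySem.Dict.empty : PySem.Dict String Int)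
        let c2 := ds2.foldl (fun d x => d.insert x (d.getD x 0 + 1)) (PySem.Dict.empty : PySem.Dict String Int)
        total + (c1.items.map (fun kv => kv.2 * c2.getD kv.1 0)).sum) 0

-- ===== PRECONDITION & SPEC =====
def Spec_compare_differences (set1 : List (String × List String)) (set2 : List (String × List String)) (object_correspondences : List (String × String)) (out : Int) : Prop := out = compare_differences_alt set1 set2 object_correspondences
instance (set1 : List (String × List String)) (set2 : List (String × List String)) (object_correspondences : List (String × String)) (out : Int) : Decidable (Spec_compare_differences set1 set2 object_correspondences out) := by unfold Spec_compare_differences; infer_instance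

-- ===== CLAIM (what is proved, stated in full; the proofs are below) =====
def Claim_equal_compare_differences : Prop := ∀ (set1 : List (String × List String)) (set2 : List (String × List String)) (object_correspondences : List (String × String)), Dom_compare_differences set1 set2 object_correspondences → Spec_compare_differences set1 set2 object_correspondences (compare_differences set1 set2 object_correspondences)

-- ===== LEMMAS AND PROOFS =====

-- Σ over a nodup list S containing x of (if x = k then f k else 0) is f x.
lemma sum_ite_single (S : List String) (x : String) (f : String → Int)
    (hN : S.Nodup) (hx : x ∈ S) :
    (S.map (fun k => if x = k then f k else 0)).sum = f x := by
  induction S with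
  | nil => cases hx
  | cons s t ih =>
    rcases List.mem_cons.mp hx with rfl | hx
    · simp only [List.map_cons, List.sum_cons]
      have hz : (t.map (fun k => if x = k then f k else 0)).sum = 0 := by
        apply List.sum_eq_zero
        intro y hy
        rcases List.mem_map.mp hy with ⟨k, hk, rfl⟩
        have hne : x ≠ k := fun h => (List.nodup_cons.mp hN).1 (h ▸ hk)
        simp [hne]
      rw [hz]; simp
    · have hne : x ≠ s := fun h => (List.nodup_cons.mp hN).1 (h ▸ hx)
      simp only [List.map_cons, List.sum_cons, if_neg hne]
      rw [ih (List.nodup_cons.mp hN).2 hx]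
      ring

-- Σ_{x ∈ xs} f x computed as Σ over a nodup superset of xs's elements, weighted by multiplicity.
lemma sum_eq_sum_counts (xs S : List String) (f : String → Int)
    (hN : S.Nodup) (hmem : ∀ x ∈ xs, x ∈ S) :
    (xs.map f).sum = (S.map (fun k => (xs.count k : Int) * f k)).sum := by
  induction xs with
  | nil => simp
  | cons x t ih =>
    have hx : x ∈ S := hmem x (List.mem_cons_self)
    have ht : ∀ y ∈ t, y ∈ S := fun y hy => hmem y (List.mem_cons_of_mem _ hy)
    simp only [List.map_cons, List.sum_cons, ih ht]
    have hsplit : ∀ k, ((x :: t).count k : Int) * f k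
        = (t.count k : Int) * f k + (if x = k then f k else 0) := by
      intro k
      rw [List.count_cons]
      by_cases h : x = k
      · subst h; simp; ring
      · have hb : (k == x) = false := beq_eq_false_iff_ne.mpr (Ne.symm h)
        simp [h]
    simp only [hsplit]
    rw [PySem.List.sum_map_add_int (f := fun k => (t.count k : Int) * f k)
        (g := fun k => if x = k then f k else 0)]
    rw [sum_ite_single S x f hN hx]
    ring

-- the per-object-pair equality: nested comparison loop = counter product-sum
lemma pair_eq (xs ys : List String) (acc : Int) :
    xs.foldl (fun a d1 => ys.foldl (fun a' d2 => if d1 == d2 then a' + 1 else a') a) acc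
      = acc + ((xs.foldl (fun d x => d.insert x (d.getD x 0 + 1)) (PySem.Dict.empty : PySem.Dict String Int)).items.map
          (fun kv => kv.2 * (ys.foldl (fun d x => d.insert x (d.getD x 0 + 1)) (PySem.Dict.empty : PySem.Dict String Int)).getD kv.1 0)).sum := by
  rw [PySem.Dict.foldl_insert_getD_add_one_eq_counter,
      PySem.Dict.foldl_insert_getD_add_one_eq_counter,
      PySem.Dict.items_counter]
  have hinner : ∀ (a : Int) (d1 : String),
      ys.foldl (fun a' d2 => if d1 == d2 then a' + 1 else a') a = a + (ys.count d1 : Int) := by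
    intro a d1
    have hc : ys.foldl (fun a' d2 => if d1 == d2 then a' + 1 else a') a
        = ys.foldl (fun a' d2 => if d2 == d1 then a' + 1 else a') a := by
      apply PySem.List.foldl_congr_mem
      intro a' d2 _
      simp [BEq.comm]
    rw [hc]
    exact PySem.List.foldl_beq_add_one ..
  have houter : xs.foldl (fun a d1 => ys.foldl (fun a' d2 => if d1 == d2 then a' + 1 else a') a) acc
      = xs.foldl (fun a d1 => a + (ys.count d1 : Int)) acc := by
    apply PySem.List.foldl_congr_mem
    intro a d1 _
    exact hinner a d1
  rw [houter, PySem.List.foldl_add (g := fun d1 => (ys.count d1 : Int))]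
  congr 1
  rw [List.map_map]
  have hcomp : ((fun kv : String × Int => kv.2 * (PySem.Dict.counter ys).getD kv.1 0) ∘
      fun k => (k, (xs.count k : Int)))
      = fun k => (xs.count k : Int) * (ys.count k : Int) := by
    funext k
    simp [PySem.Dict.getD_counter]
  rw [hcomp]
  exact sum_eq_sum_counts xs (PySem.Set.ofList xs) (fun k => (ys.count k : Int))
    (PySem.Set.nodup_ofList xs) (fun x hx => (PySem.Set.mem_ofList xs x).mpr hx)

-- ===== VERDICT (by name: the statement is the Claim_ definition above) =====
theorem compare_differences_spec : Claim_equal_compare_differences := by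
  intro set1 set2 oc _
  unfold Spec_compare_differences compare_differences compare_differences_alt
  apply PySem.List.foldl_congr_mem
  intro acc p _
  cases h1 : (PySem.Dict.mk oc).get? p.1 with
  | none => rfl
  | some o2 =>
    dsimp only
    cases h2 : (PySem.Dict.mk set2).get? o2 with
    | none =>
      exact PySem.List.foldl_ignore ..
    | some ds =>
      exact pair_eq p.2 ds acc
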